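-- pv_equiv track=rewrite | github.com/surilp/data-structure-algorithm | dynamic_programming/ninja_training.py | fill_max
-- ===== SOURCE A (Python) =====
-- def fill_max(array):
--     final = [None] * len(array)
--     for idx in range(len(array)):
--         result = 0
--         for inner_idx in range(len(array)):
--             if idx != inner_idx:
--                 result = max(result, array[inner_idx])
--         final[idx] = result
--     return final
-- ===== SOURCE B (Python) =====
-- def fill_max(array):
--     n = len(array)
--     suf = [0] * (n + 1)          # suf[i] = max(0, array[i:]) via one backward pass
--     for i in range(n - 1, -1, -1):
--         suf[i] = max(array[i], suf[i + 1])
--     out = []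
--     pre = 0                      # running max(0, array[:i])
--     for i in range(n):
--         out.append(max(pre, suf[i + 1]))
--         pre = max(pre, array[i])
--     return out
-- ===== Notes on version B (the rewrite author's own statement) =====
-- stated objective: faster
-- what changed: Replaced the quadratic double loop (rescanning the whole array for every index) by one backward pass of suffix maxima plus one forward pass with a running prefix maximum, combining prefix and suffix max at each index.
import Mathlib
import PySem

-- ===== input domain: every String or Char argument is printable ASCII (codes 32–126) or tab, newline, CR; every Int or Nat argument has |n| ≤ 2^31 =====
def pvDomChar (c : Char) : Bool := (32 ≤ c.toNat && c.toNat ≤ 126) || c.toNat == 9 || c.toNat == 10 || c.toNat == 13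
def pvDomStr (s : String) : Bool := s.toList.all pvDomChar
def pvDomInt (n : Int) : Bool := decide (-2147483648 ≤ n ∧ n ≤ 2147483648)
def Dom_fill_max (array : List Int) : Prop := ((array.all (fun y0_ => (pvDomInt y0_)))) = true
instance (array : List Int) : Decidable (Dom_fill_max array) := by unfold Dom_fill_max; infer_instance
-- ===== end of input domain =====

-- B replaces A's quadratic double scan by suffix maxima + a running prefix maximum (O(n)).

-- ===== PORT A =====
def fill_max (array : List Int) : List Int :=
  (PySem.List.pyRange 0 (array.length : Int) 1).map (fun idx =>
    (PySem.List.pyRange 0 (array.length : Int) 1).foldl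
      (fun result inner_idx =>
        if idx ≠ inner_idx then max result (PySem.List.pyGetD array inner_idx 0) else result) 0)

-- ===== PORT B =====
-- suffix maxima: sufAlt l = [max(0, l[i:]) for i = 0 .. len l]  (Source B's backward pass)
def sufAlt : List Int → List Int
  | [] => [0]
  | x :: xs => max x ((sufAlt xs).headD 0) :: sufAlt xs

-- forward pass with running prefix max `pre`, consuming l alongside the suffix maxima of l.tail
def goAlt : Int → List Int → List Int → List Int
  | _, [], _ => []
  | _, _ :: _, [] => []
  | pre, x :: xs, s :: ss => max pre s :: goAlt (max pre x) xs ss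

def fill_max_alt (array : List Int) : List Int :=
  goAlt 0 array (sufAlt array).tail

-- ===== PRECONDITION & SPEC =====
def Spec_fill_max (array : List Int) (out : List Int) : Prop := out = fill_max_alt array
instance (array : List Int) (out : List Int) : Decidable (Spec_fill_max array out) := by unfold Spec_fill_max; infer_instance

-- ===== CLAIM (what is proved, stated in full; the proofs are below) =====
def Claim_equal_fill_max : Prop := ∀ (array : List Int), Dom_fill_max array → Spec_fill_max array (fill_max array)

-- ===== LEMMAS AND PROOFS =====

theorem le_foldl_max (l : List Int) (c : Int) : c ≤ l.foldl max c := by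
  induction l generalizing c with
  | nil => simp
  | cons x xs ih => exact le_trans (le_max_left c x) (ih (max c x))

theorem foldl_max_eq (l : List Int) (c : Int) (hc : 0 ≤ c) :
    l.foldl max c = max c (l.foldl max 0) := by
  induction l generalizing c with
  | nil => simp [max_eq_left hc]
  | cons x xs ih =>
      simp only [List.foldl_cons]
      rw [ih (max c x) (le_trans hc (le_max_left c x)), ih (max 0 x) (le_max_left 0 x),
        ← max_assoc]
      congr 1
      rw [max_comm 0 x, ← max_assoc, max_eq_left (le_trans hc (le_max_left c x))]

theorem sufAlt_headD (l : List Int) : (sufAlt l).headD 0 = l.foldl max 0 := by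
  induction l with
  | nil => simp [sufAlt]
  | cons x xs ih =>
      simp only [sufAlt, List.headD_cons, ih]
      rw [List.foldl_cons, foldl_max_eq xs (max 0 x) (le_max_left 0 x), max_comm 0 x,
        max_assoc, max_eq_right (le_foldl_max xs 0)]

theorem sufAlt_eq_cons (l : List Int) : sufAlt l = l.foldl max 0 :: (sufAlt l).tail := by
  cases l with
  | nil => simp [sufAlt]
  | cons x xs =>
      have h := sufAlt_headD (x :: xs)
      simp only [sufAlt, List.headD_cons] at h ⊢
      rw [h]
      simp

theorem goAlt_spec (l : List Int) : ∀ (pre : Int),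
    goAlt pre l (sufAlt l).tail =
      (List.range l.length).map (fun k =>
        max ((l.take k).foldl max pre) ((l.drop (k + 1)).foldl max 0)) := by
  induction l with
  | nil => intro pre; simp [goAlt]
  | cons x xs ih =>
      intro pre
      have hs : (sufAlt (x :: xs)).tail = sufAlt xs := by simp [sufAlt]
      rw [hs, sufAlt_eq_cons xs]
      simp only [goAlt, List.length_cons, List.range_succ_eq_map, List.map_cons, List.map_map]
      congr 1
      rw [ih (max pre x)]
      apply List.map_congr_left
      intro k _
      simp [Function.comp, List.take_succ_cons, List.drop_succ_cons, List.foldl_cons]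

theorem inner_eq (array : List Int) (k : Nat) (hk : k < array.length) :
    (PySem.List.pyRange 0 (array.length : Int) 1).foldl
      (fun result j =>
        if (k : Int) ≠ j then max result (PySem.List.pyGetD array j 0) else result) 0
    = max ((array.take k).foldl max 0) ((array.drop (k + 1)).foldl max 0) := by
  have hsplit : PySem.List.pyRange 0 (array.length : Int) 1 =
      PySem.List.pyRange 0 (k : Int) 1 ++ PySem.List.pyRange (k : Int) (array.length : Int) 1 :=
    PySem.List.pyRange_one_append 0 (k : Int) (array.length : Int) (by omega) (by exact_mod_cast hk.le)
  have hcons : PySem.List.pyRange (k : Int) (array.length : Int) 1 =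
      (k : Int) :: PySem.List.pyRange ((k : Int) + 1) (array.length : Int) 1 :=
    PySem.List.pyRange_one_cons (by exact_mod_cast hk)
  rw [hsplit, List.foldl_append, hcons, List.foldl_cons]
  rw [if_neg (fun h => h rfl)]
  -- prefix part
  have htlen : ((array.take k).length : Int) = (k : Int) := by
    simp [List.length_take, Nat.min_eq_left hk.le]
  have hpre : (PySem.List.pyRange 0 (k : Int) 1).foldl
      (fun result j =>
        if (k : Int) ≠ j then max result (PySem.List.pyGetD array j 0) else result) 0
      = (array.take k).foldl max 0 := by
    rw [PySem.List.foldl_congr_mem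
      (g := fun result j => max result (PySem.List.pyGetD (array.take k) j 0))]
    · rw [← htlen]
      exact PySem.List.foldl_pyRange_zero_pyGetD' (array.take k) 0 max 0
    · intro acc j hj
      rw [PySem.List.mem_pyRange_one] at hj
      obtain ⟨h0, hjk⟩ := hj
      have hjn : j < (array.length : Int) := lt_of_lt_of_le hjk (by exact_mod_cast hk.le)
      rw [if_pos (by omega), PySem.List.pyGetD_eq_getElem array 0 h0 (by simpa using hjn),
        PySem.List.pyGetD_eq_getElem (array.take k) 0 h0 (by simp; omega)]
      congr 1
      rw [List.getElem_take]
  rw [hpre]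
  -- suffix part
  have hsuf : (PySem.List.pyRange ((k : Int) + 1) (array.length : Int) 1).foldl
      (fun result j =>
        if (k : Int) ≠ j then max result (PySem.List.pyGetD array j 0) else result)
      ((array.take k).foldl max 0)
      = (array.drop (k + 1)).foldl max ((array.take k).foldl max 0) := by
    rw [PySem.List.foldl_congr_mem
      (g := fun result j => max result (PySem.List.pyGetD array j 0))]
    · have := PySem.List.foldl_pyRange_pyGetD' array 0 max ((array.take k).foldl max 0)
        (a := (k : Int) + 1) (by omega)
      rw [this, show ((k : Int) + 1).toNat = k + 1 by omega]
    · intro acc j hj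
      rw [PySem.List.mem_pyRange_one] at hj
      rw [if_pos (by omega)]
  rw [hsuf, foldl_max_eq _ _ (le_foldl_max _ 0)]

theorem map_pyRange_eq {β : Type} (n : Nat) (g : Int → β) (h : Nat → β)
    (H : ∀ k, k < n → g (k : Int) = h k) :
    (PySem.List.pyRange 0 (n : Int) 1).map g = (List.range n).map h := by
  rw [PySem.List.pyRange_one]
  simp only [Int.sub_zero, Int.toNat_natCast, List.map_map]
  apply List.map_congr_left
  intro k hk
  rw [List.mem_range] at hk
  simp only [Function.comp]
  rw [show ((0 : Int) + (k : Int)) = (k : Int) by ring]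
  exact H k hk

-- ===== VERDICT (by name: the statement is the Claim_ definition above) =====
theorem fill_max_spec : Claim_equal_fill_max := by
  intro array _
  unfold Spec_fill_max fill_max fill_max_alt
  rw [goAlt_spec array 0]
  exact map_pyRange_eq array.length _ _ (fun k hk => inner_eq array k hk)
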